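-- pv_equiv track=rewrite | github.com/michavardy/chunky | src/chunky/api.py | build_chunks_from_binary_states
-- ===== SOURCE A (Python) =====
-- def build_chunks_from_binary_states(
--     sentence_sequence: list[str],
--     hidden_states_sequence: list[str],
--     max_chunk_length: int,
-- ) -> list[str]:
--     chunks = []
--     current_chunk = ""
--     for index, sentence in enumerate(sentence_sequence):
--         if index == 0:
--             current_chunk = sentence
--         else:
--             state = hidden_states_sequence[index - 1]
--
--             if state == "new_chunk":
--                 chunks.append(current_chunk.strip())
--                 current_chunk = sentence
--             elif state == "prior_chunk":
--                 if len(current_chunk) + len(sentence) + 1 > max_chunk_length: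
--                     chunks.append(current_chunk.strip())
--                     current_chunk = sentence
--                 else:
--                     current_chunk += " " + sentence
--     if current_chunk:
--         chunks.append(current_chunk.strip())
--     return chunks
-- ===== SOURCE B (Python) =====
-- def _pack(group, max_chunk_length):
--     """Greedily pack one group of sentences; return (emitted chunks, pending chunk)."""
--     emitted = []
--     current = group[0]
--     for sentence in group[1:]:
--         if len(current) + len(sentence) + 1 > max_chunk_length:
--             emitted.append(current.strip())
--             current = sentence
--         else:
--             current += " " + sentence
--     return emitted, current
--
--
-- def build_chunks_from_binary_states(sentence_sequence, hidden_states_sequence, max_chunk_length):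
--     if not sentence_sequence:
--         return []
--     # pass 1: split the sentences into groups at every "new_chunk" label
--     closed_groups = []
--     current_group = [sentence_sequence[0]]
--     for sentence, state in zip(sentence_sequence[1:], hidden_states_sequence):
--         if state == "new_chunk":
--             closed_groups.append(current_group)
--             current_group = [sentence]
--         elif state == "prior_chunk":
--             current_group.append(sentence)
--     # pass 2: pack each group; closed groups flush unconditionally, the last one only if non-empty
--     chunks = []
--     for group in closed_groups:
--         emitted, final = _pack(group, max_chunk_length)
--         chunks += emitted
--         chunks.append(final.strip())
--     emitted, final = _pack(current_group, max_chunk_length)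
--     chunks += emitted
--     if final:
--         chunks.append(final.strip())
--     return chunks
-- ===== Notes on version B (the rewrite author's own statement) =====
-- stated objective: alternative
-- what changed: Replaces A's single stateful pass (flush-on-label interleaved with length-based flushing) by two passes: first split the sentences into groups at every 'new_chunk' label (zipping sentences with states), then greedily pack each group, flushing closed groups unconditionally and guarding only the last pending chunk.
import Mathlib
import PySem

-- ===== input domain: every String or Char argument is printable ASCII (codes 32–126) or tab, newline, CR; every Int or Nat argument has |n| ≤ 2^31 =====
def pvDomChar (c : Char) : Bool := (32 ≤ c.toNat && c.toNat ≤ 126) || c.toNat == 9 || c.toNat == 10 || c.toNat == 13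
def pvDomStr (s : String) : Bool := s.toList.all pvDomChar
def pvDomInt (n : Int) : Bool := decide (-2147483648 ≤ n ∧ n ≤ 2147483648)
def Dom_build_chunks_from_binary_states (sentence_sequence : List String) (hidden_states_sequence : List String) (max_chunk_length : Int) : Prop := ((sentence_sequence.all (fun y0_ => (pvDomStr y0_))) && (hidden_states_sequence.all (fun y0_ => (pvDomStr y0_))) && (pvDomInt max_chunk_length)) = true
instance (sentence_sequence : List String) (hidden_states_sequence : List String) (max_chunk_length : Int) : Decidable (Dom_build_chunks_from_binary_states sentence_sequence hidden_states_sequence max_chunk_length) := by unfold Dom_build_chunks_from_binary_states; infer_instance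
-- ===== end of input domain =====

-- B replaces A's single stateful pass by a two-pass group-by-label then greedy-pack algorithm (same cost, different decomposition).


-- ===== PORT A =====
-- loop body of A's single pass over enumerate(sentence_sequence); none from pyGet? = IndexError (excluded by Pre_), state kept unchanged there
def pvStepA (hs : List String) (m : Int) (acc : List String × String) (p : Int × String) : List String × String :=
  if p.1 = 0 then (acc.1, p.2)
  else
    match PySem.List.pyGet? hs (p.1 - 1) with
    | none => acc
    | some state =>
      if state = "new_chunk" then (acc.1 ++ [PySem.Str.strip acc.2], p.2)
      else if state = "prior_chunk" then
        (if PySem.Str.len acc.2 + PySem.Str.len p.2 + 1 > m then (acc.1 ++ [PySem.Str.strip acc.2], p.2)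
         else (acc.1, acc.2 ++ " " ++ p.2))
      else acc

def build_chunks_from_binary_states (sentence_sequence : List String) (hidden_states_sequence : List String) (max_chunk_length : Int) : List String :=
  let st := (PySem.List.enumerate sentence_sequence).foldl (pvStepA hidden_states_sequence max_chunk_length) ([], "")
  if st.2 ≠ "" then st.1 ++ [PySem.Str.strip st.2] else st.1

-- ===== PORT B =====
-- _pack: greedily pack one group, returning (emitted chunks, pending chunk); [] is unreachable (groups are built nonempty)
def pvPackStep (m : Int) (acc : List String × String) (s : String) : List String × String :=
  if PySem.Str.len acc.2 + PySem.Str.len s + 1 > m then (acc.1 ++ [PySem.Str.strip acc.2], s)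
  else (acc.1, acc.2 ++ " " ++ s)

def pvPack (group : List String) (m : Int) : List String × String :=
  match group with
  | [] => ([], "")
  | c :: rest => rest.foldl (pvPackStep m) ([], c)

-- pass 1 loop body: split into groups at every "new_chunk" label
def pvStepG (acc : List (List String) × List String) (p : String × String) : List (List String) × List String :=
  if p.2 = "new_chunk" then (acc.1 ++ [acc.2], [p.1])
  else if p.2 = "prior_chunk" then (acc.1, acc.2 ++ [p.1])
  else acc

def build_chunks_from_binary_states_alt (sentence_sequence : List String) (hidden_states_sequence : List String) (max_chunk_length : Int) : List String :=
  match sentence_sequence with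
  | [] => []
  | s0 :: rest =>
    let g := (rest.zip hidden_states_sequence).foldl pvStepG ([], [s0])
    let chunks := g.1.foldl (fun ch gr =>
      let pr := pvPack gr max_chunk_length
      ch ++ pr.1 ++ [PySem.Str.strip pr.2]) []
    let pr := pvPack g.2 max_chunk_length
    let chunks := chunks ++ pr.1
    if pr.2 ≠ "" then chunks ++ [PySem.Str.strip pr.2] else chunks

-- ===== PRECONDITION & SPEC =====
-- Pre_ excludes exactly the inputs on which A raises IndexError: a nonempty sentence list with fewer than len-1 state labels.
def Pre_build_chunks_from_binary_states (sentence_sequence : List String) (hidden_states_sequence : List String) (max_chunk_length : Int) : Prop :=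
  sentence_sequence.length ≤ hidden_states_sequence.length + 1
instance (sentence_sequence : List String) (hidden_states_sequence : List String) (max_chunk_length : Int) : Decidable (Pre_build_chunks_from_binary_states sentence_sequence hidden_states_sequence max_chunk_length) := by unfold Pre_build_chunks_from_binary_states; infer_instance

def pvWitness_build_chunks_from_binary_states : List String × List String × Int := (["a bc", "d", "ef"], ["new_chunk", "prior_chunk"], 5)

def Spec_build_chunks_from_binary_states (sentence_sequence : List String) (hidden_states_sequence : List String) (max_chunk_length : Int) (out : List String) : Prop := out = build_chunks_from_binary_states_alt sentence_sequence hidden_states_sequence max_chunk_length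
instance (sentence_sequence : List String) (hidden_states_sequence : List String) (max_chunk_length : Int) (out : List String) : Decidable (Spec_build_chunks_from_binary_states sentence_sequence hidden_states_sequence max_chunk_length out) := by unfold Spec_build_chunks_from_binary_states; infer_instance

-- ===== CLAIM (what is proved, stated in full; the proofs are below) =====
def Claim_equal_build_chunks_from_binary_states : Prop := ∀ (sentence_sequence : List String) (hidden_states_sequence : List String) (max_chunk_length : Int), Dom_build_chunks_from_binary_states sentence_sequence hidden_states_sequence max_chunk_length → Pre_build_chunks_from_binary_states sentence_sequence hidden_states_sequence max_chunk_length → Spec_build_chunks_from_binary_states sentence_sequence hidden_states_sequence max_chunk_length (build_chunks_from_binary_states sentence_sequence hidden_states_sequence max_chunk_length)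
-- ===== LEMMAS AND PROOFS =====

-- the zipped form of A's loop body on indices ≥ 1 (sentence, state)
def pvStepZ (m : Int) (acc : List String × String) (p : String × String) : List String × String :=
  if p.2 = "new_chunk" then (acc.1 ++ [PySem.Str.strip acc.2], p.1)
  else if p.2 = "prior_chunk" then pvPackStep m acc p.1
  else acc

-- flushed output of a list of closed groups
def pvFlush (m : Int) (gs : List (List String)) : List String :=
  gs.flatMap (fun gr => (pvPack gr m).1 ++ [PySem.Str.strip (pvPack gr m).2])

lemma pvFoldA_eq_foldZ (hs : List String) (m : Int) :
    ∀ (rest : List String) (k : Nat) (acc : List String × String),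
      k + rest.length ≤ hs.length →
      List.foldl (pvStepA hs m) acc (PySem.List.enumerate rest ((k : Int) + 1))
        = List.foldl (pvStepZ m) acc (rest.zip (hs.drop k)) := by
  intro rest
  induction rest with
  | nil => intro k acc h; simp [PySem.List.enumerate_nil]
  | cons s rest ih =>
    intro k acc h
    have hk : k < hs.length := by simp at h; omega
    rw [PySem.List.enumerate_cons]
    rw [List.drop_eq_getElem_cons hk]
    rw [List.zip_cons_cons, List.foldl_cons, List.foldl_cons]
    have hstep : pvStepA hs m acc ((k : Int) + 1, s) = pvStepZ m acc (s, hs[k]) := by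
      unfold pvStepA pvStepZ pvPackStep
      have h0 : ¬ ((k : Int) + 1 = 0) := by omega
      rw [if_neg h0]
      have : PySem.List.pyGet? hs ((k : Int) + 1 - 1) = some hs[k] := by
        have : ((k : Int) + 1 - 1) = (k : Int) := by ring
        rw [this, PySem.List.pyGet?_natCast, List.getElem?_eq_getElem hk]
      rw [this]
    rw [hstep]
    have := ih (k + 1) (pvStepZ m acc (s, hs[k])) (by simp at h ⊢; omega)
    push_cast at this ⊢
    convert this using 2

lemma pvPack_append (m : Int) (cur : List String) (s : String) (h : cur ≠ []) :
    pvPack (cur ++ [s]) m = pvPackStep m (pvPack cur m) s := by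
  cases cur with
  | nil => exact absurd rfl h
  | cons c r => simp [pvPack, List.foldl_append]

lemma pvInv (m : Int) :
    ∀ (ps : List (String × String)) (gs : List (List String)) (cur : List String), cur ≠ [] →
      List.foldl (pvStepZ m) (pvFlush m gs ++ (pvPack cur m).1, (pvPack cur m).2) ps
        = (pvFlush m (List.foldl pvStepG (gs, cur) ps).1 ++ (pvPack (List.foldl pvStepG (gs, cur) ps).2 m).1,
           (pvPack (List.foldl pvStepG (gs, cur) ps).2 m).2) := by
  intro ps
  induction ps with
  | nil => intro gs cur h; simp
  | cons p ps ih =>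
    intro gs cur h
    rw [List.foldl_cons, List.foldl_cons]
    by_cases h1 : p.2 = "new_chunk"
    · have hz : pvStepZ m (pvFlush m gs ++ (pvPack cur m).1, (pvPack cur m).2) p
          = (pvFlush m (gs ++ [cur]) ++ (pvPack [p.1] m).1, (pvPack [p.1] m).2) := by
        simp [pvStepZ, h1, pvPack, pvFlush]
      have hg : pvStepG (gs, cur) p = (gs ++ [cur], [p.1]) := by simp [pvStepG, h1]
      rw [hz, hg, ih _ _ (by simp)]
    · by_cases h2 : p.2 = "prior_chunk"
      · have hg : pvStepG (gs, cur) p = (gs, cur ++ [p.1]) := by simp [pvStepG, h2]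
        have hz : pvStepZ m (pvFlush m gs ++ (pvPack cur m).1, (pvPack cur m).2) p
            = (pvFlush m gs ++ (pvPack (cur ++ [p.1]) m).1, (pvPack (cur ++ [p.1]) m).2) := by
          rw [pvPack_append m cur p.1 h]
          unfold pvStepZ
          rw [if_neg h1, if_pos h2]
          unfold pvPackStep
          split_ifs <;> simp
        rw [hz, hg, ih _ _ (by simp [h])]
      · have hg : pvStepG (gs, cur) p = (gs, cur) := by simp [pvStepG, h1, h2]
        have hz : pvStepZ m (pvFlush m gs ++ (pvPack cur m).1, (pvPack cur m).2) p
            = (pvFlush m gs ++ (pvPack cur m).1, (pvPack cur m).2) := by simp [pvStepZ, h1, h2]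
        rw [hz, hg, ih _ _ h]

lemma pvFoldFlush (m : Int) (gs : List (List String)) :
    gs.foldl (fun ch gr => ch ++ (pvPack gr m).1 ++ [PySem.Str.strip (pvPack gr m).2]) [] = pvFlush m gs := by
  have : ∀ init, gs.foldl (fun ch gr => ch ++ (pvPack gr m).1 ++ [PySem.Str.strip (pvPack gr m).2]) init = init ++ pvFlush m gs := by
    induction gs with
    | nil => simp [pvFlush]
    | cons g gs ih => intro init; rw [List.foldl_cons, ih]; simp [pvFlush]
  simpa using this []

-- ===== VERDICT (by name: the statement is the Claim_ definition above) =====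
theorem build_chunks_from_binary_states_spec : Claim_equal_build_chunks_from_binary_states := by
  intro ss hs m _ hpre
  unfold Spec_build_chunks_from_binary_states
  unfold Pre_build_chunks_from_binary_states at hpre
  cases ss with
  | nil => simp [build_chunks_from_binary_states, build_chunks_from_binary_states_alt, PySem.List.enumerate_nil]
  | cons s0 rest =>
    have hlen : rest.length ≤ hs.length := by simp at hpre; omega
    have key := pvFoldA_eq_foldZ hs m rest 0 ([], s0) (by simpa using hlen)
    rw [List.drop_zero] at key
    norm_num at key
    have inv := pvInv m (rest.zip hs) [] [s0] (by simp)
    have hinit : (pvFlush m [] ++ (pvPack [s0] m).1, (pvPack [s0] m).2) = (([] : List String), s0) := by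
      simp [pvFlush, pvPack]
    rw [hinit] at inv
    simp only [build_chunks_from_binary_states, build_chunks_from_binary_states_alt,
      PySem.List.enumerate_cons, List.foldl_cons]
    have h0 : pvStepA hs m ([], "") (0, s0) = ([], s0) := by simp [pvStepA]
    simp only [zero_add]
    rw [h0, key, inv, pvFoldFlush]
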